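-- pv_equiv track=rewrite | github.com/Ananta-dot/misr_new | save_every_round.py | motif_interleave
-- ===== SOURCE A (Python) =====
-- from typing import Dict, List, Tuple, Optional
--
-- Seq = List[int]
--
-- def motif_interleave(n: int) -> Seq:
--     out=[]
--     for i in range(1, n+1, 2):
--         j = i+1 if i+1<=n else i
--         out += [i, j, i, j]
--     # ensure exactly two per label
--     cnt = {i:0 for i in range(1,n+1)}
--     fixed=[]
--     for x in out:
--         if cnt[x] < 2:
--             fixed.append(x); cnt[x]+=1
--     for i in range(1,n+1):
--         while cnt[i] < 2:
--             fixed.append(i); cnt[i]+=1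
--     return fixed[:2*n]
-- ===== SOURCE B (Python) =====
-- from typing import List
--
-- Seq = List[int]
--
-- def motif_interleave(n: int) -> Seq:
--     # Single pass: each odd label i contributes its final block directly
--     # ([i, i+1, i, i+1] for a full pair, [i, i] for an unpaired trailing odd),
--     # so no dedup pass, no padding pass and no slice are needed.
--     res = []
--     i = 1
--     while i <= n:
--         if i + 1 <= n:
--             res += [i, i + 1, i, i + 1]
--         else:
--             res += [i, i]
--         i += 2
--     return res
-- ===== Notes on version B (the rewrite author's own statement) =====
-- stated objective: simpler
-- what changed: B emits each final block [i,i+1,i,i+1] (or trailing [i,i]) in one pass over the odd labels, replacing A's three-pass build/Counter-dedup/pad decomposition and the final slice.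
import Mathlib
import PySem

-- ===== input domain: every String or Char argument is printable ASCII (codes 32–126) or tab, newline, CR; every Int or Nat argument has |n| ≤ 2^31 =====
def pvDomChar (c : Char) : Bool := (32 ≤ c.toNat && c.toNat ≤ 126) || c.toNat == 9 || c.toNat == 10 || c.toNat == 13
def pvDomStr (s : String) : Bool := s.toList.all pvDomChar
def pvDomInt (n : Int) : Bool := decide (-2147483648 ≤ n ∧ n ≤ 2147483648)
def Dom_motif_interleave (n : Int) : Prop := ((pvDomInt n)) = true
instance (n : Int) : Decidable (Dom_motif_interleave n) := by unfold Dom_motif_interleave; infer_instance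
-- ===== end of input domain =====

-- B replaces A's three-pass build / Counter-dedup / pad / slice pipeline by one pass that
-- emits each final block directly (objective: simpler).


-- ===== PORT A =====
-- the 'while cnt[i] < 2' padding loop of A, step for step
def fillWhile (i : Int) (st : List Int × PySem.Dict Int Int) : List Int × PySem.Dict Int Int :=
  if _h : st.2.getD i 0 < 2 then
    fillWhile i (st.1 ++ [i], st.2.insert i (st.2.getD i 0 + 1))
  else st
termination_by (2 - st.2.getD i 0).toNat
decreasing_by simp [PySem.Dict.getD_insert_self]; omega

def motif_interleave (n : Int) : List Int :=
  let out : List Int := (PySem.List.pyRange 1 (n+1) 2).foldl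
    (fun acc i =>
      let j : Int := if i + 1 ≤ n then i + 1 else i
      acc ++ [i, j, i, j]) []
  let cnt0 : PySem.Dict Int Int := (PySem.List.pyRange 1 (n+1) 1).foldl
    (fun d i => d.insert i 0) PySem.Dict.empty
  -- Python's cnt[x] would raise KeyError only for x outside 1..n, which never occurs in out,
  -- so getD is exact here
  let st := out.foldl
    (fun (st : List Int × PySem.Dict Int Int) x =>
      if st.2.getD x 0 < 2 then (st.1 ++ [x], st.2.insert x (st.2.getD x 0 + 1)) else st)
    ([], cnt0)
  let st2 := (PySem.List.pyRange 1 (n+1) 1).foldl (fun s i => fillWhile i s) st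
  PySem.List.slice st2.1 none (some (2 * n))

-- ===== PORT B =====
-- B's while loop over the odd labels
def altGo (n i : Int) : List Int :=
  if _h : i ≤ n then
    (if i + 1 ≤ n then [i, i + 1, i, i + 1] else [i, i]) ++ altGo n (i + 2)
  else []
termination_by (n + 1 - i).toNat
decreasing_by omega

def motif_interleave_alt (n : Int) : List Int := altGo n 1

-- ===== PRECONDITION & SPEC =====
def Spec_motif_interleave (n : Int) (out : List Int) : Prop := out = motif_interleave_alt n
instance (n : Int) (out : List Int) : Decidable (Spec_motif_interleave n out) := by unfold Spec_motif_interleave; infer_instance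

-- ===== CLAIM (what is proved, stated in full; the proofs are below) =====
def Claim_equal_motif_interleave : Prop := ∀ (n : Int), Dom_motif_interleave n → Spec_motif_interleave n (motif_interleave n)

-- ===== LEMMAS AND PROOFS =====

-- the block A builds for odd label i (before dedup) and the final block both programs agree on
def blkA (n i : Int) : List Int :=
  let j : Int := if i + 1 ≤ n then i + 1 else i
  [i, j, i, j]

def blk (n i : Int) : List Int :=
  if i + 1 ≤ n then [i, i + 1, i, i + 1] else [i, i]

-- step-2 range induction forms (PySem only lists step-1 forms)
theorem pyRange2_nil (a b : Int) (h : b ≤ a) : PySem.List.pyRange a b 2 = [] := by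
  rw [PySem.List.pyRange_of_pos a b (by omega)]
  simp [show ¬ a < b by omega]

theorem pyRange2_cons (a b : Int) (h : a < b) :
    PySem.List.pyRange a b 2 = a :: PySem.List.pyRange (a + 2) b 2 := by
  rw [PySem.List.pyRange_of_pos a b (by omega), PySem.List.pyRange_of_pos (a + 2) b (by omega)]
  by_cases h2 : a + 2 < b
  · have hc : ((b - a + 2 - 1) / 2).toNat = ((b - (a + 2) + 2 - 1) / 2).toNat + 1 := by
      omega
    rw [if_pos h, if_pos h2, hc, List.range_succ_eq_map]
    simp only [List.map_cons, List.map_map, Nat.cast_zero, mul_zero, add_zero, List.cons.injEq,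
      true_and]
    refine List.map_congr_left ?_
    intro k _
    simp only [Function.comp_apply]
    push_cast
    ring
  · have hc : ((b - a + 2 - 1) / 2).toNat = 1 := by omega
    rw [if_pos h, if_neg h2, hc]
    simp

-- A's dedup loop body, named so that the fold can be rewritten step by step
def dstep (st : List Int × PySem.Dict Int Int) (x : Int) : List Int × PySem.Dict Int Int :=
  if st.2.getD x 0 < 2 then (st.1 ++ [x], st.2.insert x (st.2.getD x 0 + 1)) else st

theorem dstep_ge (st : List Int × PySem.Dict Int Int) (x : Int)
    (h : ¬ st.2.getD x 0 < 2) : dstep st x = st := by rw [dstep, if_neg h]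

-- the dict comprehension {i: 0 …} looks up as the constant 0
theorem cnt0_getD (l : List Int) (d : PySem.Dict Int Int) (hd : ∀ k, d.getD k 0 = 0) (k : Int) :
    (l.foldl (fun d i => d.insert i (0 : Int)) d).getD k 0 = 0 := by
  induction l generalizing d with
  | nil => exact hd k
  | cons x t ih =>
      simp only [List.foldl_cons]
      exact ih _ (fun k' => by rw [PySem.Dict.getD_insert]; split <;> simp [hd])

-- main invariant of A's dedup pass: on the blocks for odd labels a..n it keeps exactly
-- blk, and leaves every label in [a, n] with count 2
theorem dedup_main (n : Int) (m : Nat) :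
    ∀ (a : Int), a % 2 = 1 → (n + 1 - a).toNat ≤ m →
    ∀ (d : PySem.Dict Int Int), (∀ k, a ≤ k → d.getD k 0 = 0) → ∀ (acc : List Int),
    (((PySem.List.pyRange a (n+1) 2).flatMap (blkA n)).foldl dstep (acc, d)).1
      = acc ++ (PySem.List.pyRange a (n+1) 2).flatMap (blk n)
    ∧ ∀ k, (((PySem.List.pyRange a (n+1) 2).flatMap (blkA n)).foldl dstep (acc, d)).2.getD k 0
      = if a ≤ k ∧ k ≤ n then 2 else d.getD k 0 := by
  induction m with
  | zero =>
      intro a _ hm d hd acc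
      rw [pyRange2_nil a (n+1) (by omega)]
      refine ⟨by simp, ?_⟩
      intro k
      simp only [List.flatMap_nil, List.foldl_nil]
      rw [if_neg (by omega)]
  | succ m ih =>
      intro a ha hm d hd acc
      by_cases han : a ≤ n
      · rw [pyRange2_cons a (n+1) (by omega)]
        simp only [List.flatMap_cons]
        by_cases hp : a + 1 ≤ n
        · -- full pair block [a, a+1, a, a+1]
          have hA : blkA n a = [a, a + 1, a, a + 1] := by simp [blkA, hp]
          have g0 : d.getD a 0 = 0 := hd a le_rfl
          have g1 : d.getD (a + 1) 0 = 0 := hd (a + 1) (by omega)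
          have e1 : dstep (acc, d) a = (acc ++ [a], d.insert a 1) := by
            simp [dstep, g0]
          have gd1 : (d.insert a 1).getD (a + 1) 0 = 0 := by
            rw [PySem.Dict.getD_insert, if_neg (by omega)]; exact g1
          have e2 : dstep (acc ++ [a], d.insert a 1) (a + 1)
              = (acc ++ [a, a + 1], (d.insert a 1).insert (a + 1) 1) := by
            simp [dstep, gd1]
          have gd2 : ((d.insert a 1).insert (a + 1) 1).getD a 0 = 1 := by
            rw [PySem.Dict.getD_insert, if_neg (by omega), PySem.Dict.getD_insert_self]
          have e3 : dstep (acc ++ [a, a + 1], (d.insert a 1).insert (a + 1) 1) a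
              = (acc ++ [a, a + 1, a], ((d.insert a 1).insert (a + 1) 1).insert a 2) := by
            simp [dstep, gd2]
          have gd3 : (((d.insert a 1).insert (a + 1) 1).insert a 2).getD (a + 1) 0 = 1 := by
            rw [PySem.Dict.getD_insert, if_neg (by omega), PySem.Dict.getD_insert_self]
          have e4 : dstep (acc ++ [a, a + 1, a], ((d.insert a 1).insert (a + 1) 1).insert a 2)
                (a + 1)
              = (acc ++ [a, a + 1, a, a + 1],
                 (((d.insert a 1).insert (a + 1) 1).insert a 2).insert (a + 1) 2) := by
            simp [dstep, gd3]
          have hd4g : ∀ k,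
              ((((d.insert a 1).insert (a + 1) 1).insert a 2).insert (a + 1) 2).getD k 0
                = if k = a ∨ k = a + 1 then 2 else d.getD k 0 := by
            intro k
            simp only [PySem.Dict.getD_insert]
            split_ifs <;> first | rfl | omega
          obtain ⟨ih1, ih2⟩ := ih (a + 2) (by omega) (by omega)
            ((((d.insert a 1).insert (a + 1) 1).insert a 2).insert (a + 1) 2)
            (fun k hk => by rw [hd4g k, if_neg (by omega)]; exact hd k (by omega))
            (acc ++ [a, a + 1, a, a + 1])
          rw [hA, List.foldl_append]
          simp only [List.foldl_cons, List.foldl_nil]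
          rw [e1, e2, e3, e4]
          refine ⟨?_, ?_⟩
          · rw [ih1]
            simp [blk, hp]
          · intro k
            rw [ih2 k, hd4g k]
            split_ifs <;> first | rfl | omega
        · -- trailing odd block [a, a, a, a]; here a = n and the dedup keeps only [a, a]
          have hA : blkA n a = [a, a, a, a] := by simp [blkA, hp]
          have g0 : d.getD a 0 = 0 := hd a le_rfl
          have e1 : dstep (acc, d) a = (acc ++ [a], d.insert a 1) := by
            simp [dstep, g0]
          have gd1 : (d.insert a 1).getD a 0 = 1 := PySem.Dict.getD_insert_self ..
          have e2 : dstep (acc ++ [a], d.insert a 1) a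
              = (acc ++ [a, a], (d.insert a 1).insert a 2) := by
            simp [dstep, gd1]
          have gd2 : ((d.insert a 1).insert a 2).getD a 0 = 2 := PySem.Dict.getD_insert_self ..
          have e3 : dstep (acc ++ [a, a], (d.insert a 1).insert a 2) a
              = (acc ++ [a, a], (d.insert a 1).insert a 2) :=
            dstep_ge _ _ (by rw [gd2]; omega)
          rw [hA, List.foldl_append]
          simp only [List.foldl_cons, List.foldl_nil]
          rw [e1, e2, e3, e3, pyRange2_nil (a + 2) (n + 1) (by omega)]
          simp only [List.flatMap_nil, List.foldl_nil]
          refine ⟨by simp [blk, hp], ?_⟩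
          intro k
          simp only [PySem.Dict.getD_insert]
          split_ifs <;> first | rfl | omega
      · rw [pyRange2_nil a (n+1) (by omega)]
        refine ⟨by simp, ?_⟩
        intro k
        simp only [List.flatMap_nil, List.foldl_nil]
        rw [if_neg (by omega)]

-- B computes exactly the concatenation of the final blocks
theorem altGo_eq (n : Int) (m : Nat) :
    ∀ (a : Int), (n + 1 - a).toNat ≤ m →
    altGo n a = (PySem.List.pyRange a (n+1) 2).flatMap (blk n) := by
  induction m with
  | zero =>
      intro a hm
      rw [altGo, pyRange2_nil a (n+1) (by omega)]
      simp [show ¬ a ≤ n by omega]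
  | succ m ih =>
      intro a hm
      rw [altGo]
      by_cases h : a ≤ n
      · rw [dif_pos h, pyRange2_cons a (n+1) (by omega), List.flatMap_cons,
          ih (a + 2) (by omega)]
        simp [blk]
      · rw [dif_neg h, pyRange2_nil a (n+1) (by omega)]
        simp

theorem blk_length (n : Int) (m : Nat) :
    ∀ (a : Int), a % 2 = 1 → (n + 1 - a).toNat ≤ m →
    ((PySem.List.pyRange a (n+1) 2).flatMap (blk n)).length = 2 * (n + 1 - a).toNat := by
  induction m with
  | zero =>
      intro a _ hm
      rw [pyRange2_nil a (n+1) (by omega)]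
      simp; omega
  | succ m ih =>
      intro a ha hm
      by_cases h : a ≤ n
      · rw [pyRange2_cons a (n+1) (by omega), List.flatMap_cons, List.length_append,
          ih (a + 2) (by omega) (by omega)]
        by_cases hp : a + 1 ≤ n <;> simp [blk, hp] <;> omega
      · rw [pyRange2_nil a (n+1) (by omega)]
        simp; omega

theorem foldl_self {α β : Type} (g : β → α → β) (l : List α) (s : β)
    (h : ∀ x ∈ l, g s x = s) : l.foldl g s = s := by
  induction l with
  | nil => rfl
  | cons x t ih =>
      simp only [List.foldl_cons, h x (by simp)]
      exact ih (fun y hy => h y (by simp [hy]))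

theorem fillWhile_done (i : Int) (st : List Int × PySem.Dict Int Int)
    (h : st.2.getD i 0 = 2) : fillWhile i st = st := by
  rw [fillWhile, dif_neg (by omega)]

-- ===== VERDICT (by name: the statement is the Claim_ definition above) =====
theorem motif_interleave_spec : Claim_equal_motif_interleave := by
  unfold Claim_equal_motif_interleave
  intro n _
  unfold Spec_motif_interleave motif_interleave motif_interleave_alt
  simp only []
  rw [show (fun (acc : List Int) (i : Int) =>
        let j : Int := if i + 1 ≤ n then i + 1 else i
        acc ++ [i, j, i, j]) = fun acc i => acc ++ blkA n i from rfl]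
  rw [PySem.List.foldl_append_eq_flatMap (blkA n), List.nil_append]
  rw [show (fun (st : List Int × PySem.Dict Int Int) x =>
        if st.2.getD x 0 < 2 then (st.1 ++ [x], st.2.insert x (st.2.getD x 0 + 1)) else st)
      = dstep from rfl]
  have hd0 : ∀ k : Int, ((PySem.List.pyRange 1 (n+1) 1).foldl
      (fun d i => d.insert i (0 : Int)) PySem.Dict.empty).getD k 0 = 0 :=
    cnt0_getD _ _ (fun k => by simp [PySem.Dict.getD_empty])
  obtain ⟨h1, h2⟩ := dedup_main n (n + 1 - 1).toNat 1 (by decide) le_rfl _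
    (fun k _ => hd0 k) []
  rw [List.nil_append] at h1
  set st := ((PySem.List.pyRange 1 (n+1) 2).flatMap (blkA n)).foldl dstep
      ([], ((PySem.List.pyRange 1 (n+1) 1).foldl
        (fun d i => d.insert i (0 : Int)) PySem.Dict.empty)) with hst
  have hfill : (PySem.List.pyRange 1 (n+1) 1).foldl (fun s i => fillWhile i s) st = st := by
    apply foldl_self
    intro x hx
    rw [PySem.List.mem_pyRange_one] at hx
    exact fillWhile_done x st (by rw [h2 x, if_pos (by omega)])
  rw [hfill, h1, altGo_eq n (n + 1 - 1).toNat 1 le_rfl]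
  by_cases hn : 0 ≤ n
  · rw [PySem.List.slice_to _ (by omega)]
    apply List.take_of_length_le
    rw [blk_length n (n + 1 - 1).toNat 1 (by decide) le_rfl]
    omega
  · rw [pyRange2_nil 1 (n+1) (by omega)]
    simp [PySem.List.slice]
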